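-- pv_equiv track=rewrite | github.com/weed478/wdi6 | zad26.py | num_gen
-- ===== SOURCE A (Python) =====
-- def num_gen(num, a, b):
--     if a != 0:
--         _num = num * 10 + 1
--         yield from num_gen(_num, a - 1, b)
--     if b != 0:
--         _num = num * 10 + 0
--         yield from num_gen(_num, a, b - 1)
--     if a == b == 0:
--         yield num
-- ===== SOURCE B (Python) =====
-- def num_gen(num, a, b):
--     # Bottom-up dynamic programming over (ones, zeros): row[j] holds every
--     # suffix value with i ones and j zeros; the answer row is scaled onto num.
--     prev = [[0]] * (b + 1)          # i = 0: the only suffix is all zeros, value 0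
--     for i in range(1, a + 1):
--         row = []
--         for j in range(b + 1):
--             res = [10 ** (i + j - 1) + v for v in prev[j]]
--             if j:
--                 res += row[j - 1]
--             row.append(res)
--         prev = row
--     p = 10 ** (a + b)
--     for v in prev[b]:
--         yield num * p + v
-- ===== Notes on version B (the rewrite author's own statement) =====
-- stated objective: alternative
-- what changed: Replaces the top-down recursive generator with an iterative bottom-up dynamic-programming table over (ones, zeros) counts, scaling the final row onto num; Pre_ excludes negative a or b, on which A recurses forever (RecursionError).
import Mathlib
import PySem

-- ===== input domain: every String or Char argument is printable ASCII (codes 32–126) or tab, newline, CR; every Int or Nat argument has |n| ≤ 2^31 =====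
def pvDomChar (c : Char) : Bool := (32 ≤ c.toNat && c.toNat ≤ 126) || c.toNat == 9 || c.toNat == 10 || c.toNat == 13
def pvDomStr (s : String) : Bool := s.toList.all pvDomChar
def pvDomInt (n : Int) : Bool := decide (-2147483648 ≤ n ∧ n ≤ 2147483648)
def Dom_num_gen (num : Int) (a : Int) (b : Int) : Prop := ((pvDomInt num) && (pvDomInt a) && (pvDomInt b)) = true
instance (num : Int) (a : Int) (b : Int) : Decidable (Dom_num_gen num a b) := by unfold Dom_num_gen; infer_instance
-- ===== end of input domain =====

-- B replaces A's top-down recursive generator by an iterative bottom-up DP table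
-- over (ones, zeros) counts; equivalence is about the list of yielded values.

-- ===== PORT A =====
-- A's recursion on Int diverges for negative a/b (excluded by Pre_); the port
-- recurses on the Nat images, which agree with the Python on Pre_.
def numGenRec (num : Int) (a b : Nat) : List Int :=
  (if a ≠ 0 then numGenRec (num * 10 + 1) (a - 1) b else []) ++
  ((if b ≠ 0 then numGenRec (num * 10 + 0) a (b - 1) else []) ++
   (if a = 0 ∧ b = 0 then [num] else []))
termination_by a + b
decreasing_by all_goals omega

def num_gen (num : Int) (a : Int) (b : Int) : List Int :=
  numGenRec num a.toNat b.toNat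

-- ===== PORT B =====
-- inner loop of Source B: build row i from row i-1 (j = 0 .. b)
def buildRow (i b : Nat) (prev : List (List Int)) : List (List Int) :=
  (List.range (b + 1)).foldl
    (fun row j =>
      let res := ((prev.getD j []).map (fun v => (10 : Int) ^ (i + j - 1) + v)) ++
                 (if j ≠ 0 then row.getD (j - 1) [] else [])
      row ++ [res]) []

def num_gen_alt (num : Int) (a : Int) (b : Int) : List Int :=
  let B := b.toNat
  let prev0 : List (List Int) := List.replicate (B + 1) [0]
  let prev := (List.range' 1 a.toNat).foldl (fun prev i => buildRow i B prev) prev0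
  -- 10 ** (a + b): guarded because a negative exponent gives a float in Python (outside Pre_)
  let p : Int := if 0 ≤ a + b then (10 : Int) ^ (a + b).toNat else 0
  (prev.getD B []).map (fun v => num * p + v)

-- ===== PRECONDITION & SPEC =====
-- Pre_ excludes negative a or b, on which the Python A recurses without bound (RecursionError).
def Pre_num_gen (num : Int) (a : Int) (b : Int) : Prop := 0 ≤ a ∧ 0 ≤ b
instance (num : Int) (a : Int) (b : Int) : Decidable (Pre_num_gen num a b) := by unfold Pre_num_gen; infer_instance
def pvWitness_num_gen : Int × Int × Int := (5, 2, 1)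

def Spec_num_gen (num : Int) (a : Int) (b : Int) (out : List Int) : Prop := out = num_gen_alt num a b
instance (num : Int) (a : Int) (b : Int) (out : List Int) : Decidable (Spec_num_gen num a b out) := by unfold Spec_num_gen; infer_instance

-- ===== CLAIM (what is proved, stated in full; the proofs are below) =====
def Claim_equal_num_gen : Prop := ∀ (num : Int) (a : Int) (b : Int), Dom_num_gen num a b → Pre_num_gen num a b → Spec_num_gen num a b (num_gen num a b)


-- ===== LEMMAS AND PROOFS =====

-- suffix values with i ones and j zeros, in A's emission order
def T : Nat → Nat → List Int
  | 0, _ => [0]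
  | i + 1, 0 => (T i 0).map (fun v => (10 : Int) ^ i + v)
  | i + 1, j + 1 => (T i (j + 1)).map (fun v => (10 : Int) ^ (i + j + 1) + v) ++ T (i + 1) j

theorem getD_map_range (f : Nat → List Int) (n k : Nat) (h : k < n) :
    ((List.range n).map f).getD k [] = f k := by
  simp [List.getD_eq_getElem?_getD, h]

theorem numGenRec_eq_T_aux (n : Nat) : ∀ (num : Int) (a b : Nat), a + b = n →
    numGenRec num a b = (T a b).map (fun v => num * (10 : Int) ^ (a + b) + v) := by
  induction n using Nat.strong_induction_on with
  | _ n ih =>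
    intro num a b h
    rw [numGenRec]
    cases a with
    | zero =>
      cases b with
      | zero => simp [T]
      | succ j =>
        rw [if_neg (show ¬((0:Nat) ≠ 0) by omega), if_pos (show (j:Nat)+1 ≠ 0 by omega),
            if_neg (show ¬((0:Nat) = 0 ∧ (j:Nat)+1 = 0) by omega)]
        simp only [Nat.add_sub_cancel, List.nil_append, List.append_nil]
        rw [ih (0 + j) (by omega) (num * 10 + 0) 0 j rfl]
        simp [T]
        ring
    | succ i =>
      cases b with
      | zero =>
        rw [if_pos (show (i:Nat)+1 ≠ 0 by omega), if_neg (show ¬((0:Nat) ≠ 0) by omega),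
            if_neg (show ¬((i:Nat)+1 = 0 ∧ (0:Nat) = 0) by omega)]
        simp only [Nat.add_sub_cancel, List.append_nil]
        rw [ih (i + 0) (by omega) (num * 10 + 1) i 0 (by omega)]
        simp only [T, List.map_map]
        apply List.map_congr_left
        intro v _
        simp only [Function.comp]
        rw [show (i:Nat) + 1 + 0 = i + 1 by omega, show (i:Nat) + 0 = i by omega]
        ring
      | succ j =>
        rw [if_pos (show (i:Nat)+1 ≠ 0 by omega), if_pos (show (j:Nat)+1 ≠ 0 by omega),
            if_neg (show ¬((i:Nat)+1 = 0 ∧ (j:Nat)+1 = 0) by omega)]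
        simp only [Nat.add_sub_cancel, List.append_nil]
        rw [ih (i + (j + 1)) (by omega) (num * 10 + 1) i (j + 1) rfl,
            ih ((i + 1) + j) (by omega) (num * 10 + 0) (i + 1) j rfl]
        simp only [T, List.map_append, List.map_map]
        congr 1
        · apply List.map_congr_left
          intro v _
          simp only [Function.comp]
          rw [show (i:Nat) + (j+1) = i + j + 1 by omega, show (i:Nat)+1 + (j+1) = i + j + 2 by omega]
          ring
        · apply List.map_congr_left
          intro v _
          rw [show (i:Nat)+1 + j = i + j + 1 by omega, show (i:Nat)+1 + (j+1) = i + j + 2 by omega]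
          ring

theorem numGenRec_eq_T (num : Int) (a b : Nat) :
    numGenRec num a b = (T a b).map (fun v => num * (10 : Int) ^ (a + b) + v) :=
  numGenRec_eq_T_aux (a + b) num a b rfl

theorem buildRow_aux (i b : Nat) (P : List (List Int))
    (hP : ∀ j, j ≤ b → P.getD j [] = T i j) : ∀ k, k ≤ b + 1 →
    (List.range k).foldl
      (fun row j =>
        let res := ((P.getD j []).map (fun v => (10 : Int) ^ (i + 1 + j - 1) + v)) ++
                   (if j ≠ 0 then row.getD (j - 1) [] else [])
        row ++ [res]) [] = (List.range k).map (T (i + 1)) := by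
  intro k
  induction k with
  | zero => simp
  | succ k ihk =>
    intro hk
    rw [List.range_succ, List.foldl_append, ihk (by omega), List.foldl_cons, List.foldl_nil,
        List.map_append]
    rw [hP k (by omega)]
    cases k with
    | zero => simp [T]
    | succ j =>
      rw [if_pos (show (j+1:Nat) ≠ 0 by omega),
          show i + 1 + (j + 1) - 1 = i + j + 1 by omega, Nat.add_sub_cancel,
          getD_map_range (T (i+1)) (j+1) j (by omega)]
      simp [T]

theorem buildRow_eq (i b : Nat) :
    buildRow (i + 1) b ((List.range (b + 1)).map (T i)) =
      (List.range (b + 1)).map (T (i + 1)) := by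
  unfold buildRow
  exact buildRow_aux i b _ (fun j hj => getD_map_range (T i) (b + 1) j (by omega)) (b + 1) (le_refl _)

theorem rows_eq (A b : Nat) :
    (List.range' 1 A).foldl (fun prev i => buildRow i b prev) (List.replicate (b + 1) [0]) =
      (List.range (b + 1)).map (T A) := by
  induction A with
  | zero =>
    simp only [List.range', List.foldl_nil]
    rw [show (List.range (b+1)).map (T 0) = (List.range (b+1)).map (fun _ => ([0] : List Int))
        from List.map_congr_left (fun x _ => by simp [T])]
    rw [List.map_const', List.length_range]
  | succ A ihA =>
    rw [List.range'_concat, List.foldl_append, ihA, List.foldl_cons, List.foldl_nil,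
        show 1 + 1 * A = A + 1 by omega, buildRow_eq]

-- ===== VERDICT (by name: the statement is the Claim_ definition above) =====
theorem num_gen_spec : Claim_equal_num_gen := by
  intro num a b _ hpre
  obtain ⟨ha, hb⟩ := hpre
  show num_gen num a b = num_gen_alt num a b
  simp only [num_gen, num_gen_alt]
  rw [rows_eq, getD_map_range _ _ _ (by omega), numGenRec_eq_T,
      if_pos (by omega : (0:Int) ≤ a + b), Int.toNat_add ha hb]
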